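-- pv_equiv track=rewrite | github.com/jdpgrailsdev/advent_of_code_2021 | advent_of_code/puzzles/Puzzle05.py | __build_diagram
-- ===== SOURCE A (Python) =====
-- def __build_diagram(coordinates):
--
--     diagram = {}
--
--     for c in coordinates:
--         x = c[0]
--         y = c[1]
--
--         if y in diagram:
--             counts = diagram[y]
--             if x in counts:
--                 counts[x] += 1
--             else:
--                 counts[x] = 1
--         else:
--             diagram[y] = {x: 1}
--
--     return diagram
-- ===== SOURCE B (Python) =====
-- def __build_diagram(coordinates):
--     pairs = [(c[0], c[1]) for c in coordinates]
--     return {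
--         y: {x: pairs.count((x, y))
--             for x in dict.fromkeys(p[0] for p in pairs if p[1] == y)}
--         for y in dict.fromkeys(p[1] for p in pairs)
--     }
-- ===== Notes on version B (the rewrite author's own statement) =====
-- stated objective: alternative
-- what changed: B replaces A's incremental nested-dict building (membership tests and in-place increments) with a declarative nested comprehension: dedup the y values, dedup the x values per y, and count occurrences of each (x, y) pair.
import Mathlib
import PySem

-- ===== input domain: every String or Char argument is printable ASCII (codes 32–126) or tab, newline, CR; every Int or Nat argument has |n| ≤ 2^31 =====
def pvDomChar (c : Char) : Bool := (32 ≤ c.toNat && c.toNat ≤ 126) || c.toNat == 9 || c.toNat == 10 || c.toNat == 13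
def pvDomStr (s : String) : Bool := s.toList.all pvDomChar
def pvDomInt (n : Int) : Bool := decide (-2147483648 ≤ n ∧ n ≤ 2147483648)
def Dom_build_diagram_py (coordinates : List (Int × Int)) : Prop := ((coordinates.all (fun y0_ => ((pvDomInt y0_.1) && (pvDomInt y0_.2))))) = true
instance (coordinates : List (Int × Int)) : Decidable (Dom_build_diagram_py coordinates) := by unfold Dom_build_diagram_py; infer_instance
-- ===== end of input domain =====

-- B rebuilds the nested count dict by a nested comprehension (dedup the ys, dedup the xs per y, count each
-- (x, y) pair) instead of A's incremental membership-test-and-increment loop; same value, no speed claim.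

-- ===== PORT A =====
def build_diagram_py (coordinates : List (Int × Int)) : List (Int × List (Int × Int)) :=
  let diagram := coordinates.foldl (fun diagram c =>
    let x := c.1
    let y := c.2
    if diagram.contains y then
      let counts := diagram.getD y PySem.Dict.empty
      if counts.contains x then
        diagram.insert y (counts.insert x (counts.getD x 0 + 1))
      else
        diagram.insert y (counts.insert x 1)
    else
      diagram.insert y ((PySem.Dict.empty : PySem.Dict Int Int).insert x 1))
    (PySem.Dict.empty : PySem.Dict Int (PySem.Dict Int Int))
  diagram.items.map (fun p => (p.1, p.2.items))

-- ===== PORT B =====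
def build_diagram_py_alt (coordinates : List (Int × Int)) : List (Int × List (Int × Int)) :=
  let pairs := coordinates.map (fun c => (c.1, c.2))
  (PySem.List.dedup (pairs.map (fun p => p.2))).map (fun y =>
    (y, (PySem.List.dedup ((pairs.filter (fun p => p.2 == y)).map (fun p => p.1))).map
        (fun x => (x, PySem.List.count pairs (x, y)))))

-- ===== PRECONDITION & SPEC =====
def Spec_build_diagram_py (coordinates : List (Int × Int)) (out : List (Int × List (Int × Int))) : Prop := out = build_diagram_py_alt coordinates
instance (coordinates : List (Int × Int)) (out : List (Int × List (Int × Int))) : Decidable (Spec_build_diagram_py coordinates out) := by unfold Spec_build_diagram_py; infer_instance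

-- ===== CLAIM (what is proved, stated in full; the proofs are below) =====
def Claim_equal_build_diagram_py : Prop := ∀ (coordinates : List (Int × Int)), Dom_build_diagram_py coordinates → Spec_build_diagram_py coordinates (build_diagram_py coordinates)

-- ===== LEMMAS AND PROOFS =====

-- A's loop body as a named step function (identical to the lambda in the port)
def pvStepA (d : PySem.Dict Int (PySem.Dict Int Int)) (c : Int × Int) : PySem.Dict Int (PySem.Dict Int Int) :=
  let x := c.1
  let y := c.2
  if d.contains y then
    let counts := d.getD y PySem.Dict.empty
    if counts.contains x then
      d.insert y (counts.insert x (counts.getD x 0 + 1))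
    else
      d.insert y (counts.insert x 1)
  else
    d.insert y ((PySem.Dict.empty : PySem.Dict Int Int).insert x 1)

-- the inner dict of B's result at key y, as an items list
def pvInner (l : List (Int × Int)) (y : Int) : List (Int × Int) :=
  (PySem.Set.ofList ((l.filter (fun p => p.2 == y)).map Prod.fst)).map
    (fun x => (x, (l.count (x, y) : Int)))

-- B's result as a nested Dict
def pvSpecD (l : List (Int × Int)) : PySem.Dict Int (PySem.Dict Int Int) :=
  PySem.Dict.mk ((PySem.Set.ofList (l.map Prod.snd)).map
    (fun y => (y, PySem.Dict.mk (pvInner l y))))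

lemma pvStepA_eq (d : PySem.Dict Int (PySem.Dict Int Int)) (c : Int × Int) :
    pvStepA d c = d.insert c.2 ((d.getD c.2 PySem.Dict.empty).insert c.1
      ((d.getD c.2 PySem.Dict.empty).getD c.1 0 + 1)) := by
  unfold pvStepA
  simp only []
  split_ifs with h1 h2
  · rfl
  · rw [show (d.getD c.2 PySem.Dict.empty).getD c.1 0 = 0 from
      PySem.Dict.getD_of_not_contains _ _ (by simpa using h2)]
    norm_num
  · rw [PySem.Dict.getD_of_not_contains (h := by simpa using h1), PySem.Dict.getD_empty]
    norm_num

lemma pvInner_ne (l : List (Int × Int)) (x y y' : Int) (h : y' ≠ y) :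
    pvInner (l ++ [(x, y)]) y' = pvInner l y' := by
  unfold pvInner
  simp [List.filter_append, List.count_append, Ne.symm h]

lemma pvInner_step (l : List (Int × Int)) (x y : Int) :
    (PySem.Dict.mk (pvInner l y)).insert x ((PySem.Dict.mk (pvInner l y)).getD x 0 + 1)
      = PySem.Dict.mk (pvInner (l ++ [(x, y)]) y) := by
  set xs := PySem.Set.ofList ((l.filter (fun p => p.2 == y)).map Prod.fst) with hxs
  have hkeys : (PySem.Dict.mk (pvInner l y)).keys = xs := by
    rw [hxs]
    simp only [pvInner, PySem.Dict.keys, List.map_map]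
    exact List.map_id'' (fun _ => rfl) _
  have hnodup : (PySem.Dict.mk (pvInner l y)).keys.Nodup := by
    rw [hkeys]; exact PySem.Set.nodup_ofList _
  have hinner' : pvInner (l ++ [(x, y)]) y
      = (PySem.Set.add xs x).map (fun x0 => (x0, (l.count (x0, y) : Int) + List.count (x0, y) [(x, y)])) := by
    simp [pvInner, List.filter_append, List.count_append, PySem.Set.ofList_append_singleton, hxs]
  by_cases hx : x ∈ xs
  · have hc : (PySem.Dict.mk (pvInner l y)).contains x = true := by
      rw [PySem.Dict.contains_eq_decide_mem_keys, hkeys]; simpa using hx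
    have hmem : (x, (l.count (x, y) : Int)) ∈ (PySem.Dict.mk (pvInner l y)).items :=
      List.mem_map_of_mem hx
    have hgetD : (PySem.Dict.mk (pvInner l y)).getD x 0 = (l.count (x, y) : Int) :=
      PySem.Dict.getD_of_mem_items _ hmem hnodup 0
    apply PySem.Dict.ext
    rw [PySem.Dict.items_insert_of_contains (h := hc), hgetD, hinner']
    rw [PySem.Set.add_of_mem hx]
    simp only [pvInner, List.map_map]
    apply List.map_congr_left
    intro x0 hx0
    by_cases hxx : x0 = x
    · subst hxx; simp
    · simp [hxx, Ne.symm hxx, Function.comp]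
  · have hc : (PySem.Dict.mk (pvInner l y)).contains x = false := by
      rw [PySem.Dict.contains_eq_decide_mem_keys, hkeys]; simpa using hx
    have hcount0 : l.count (x, y) = 0 := by
      rw [List.count_eq_zero]
      intro hmem
      exact hx (by
        rw [hxs, PySem.Set.mem_ofList]
        exact List.mem_map_of_mem (List.mem_filter.mpr ⟨hmem, by exact beq_self_eq_true y⟩))
    have hgetD : (PySem.Dict.mk (pvInner l y)).getD x 0 = 0 :=
      PySem.Dict.getD_of_not_contains _ _ hc
    apply PySem.Dict.ext
    rw [PySem.Dict.items_insert_of_not_contains (h := hc), hgetD, hinner',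
      PySem.Set.add_of_not_mem hx]
    simp only [pvInner, List.map_append, List.map_singleton]
    congr 1
    · apply List.map_congr_left
      intro x0 hx0
      have hne : x0 ≠ x := fun h => hx (h ▸ hx0)
      simp [Ne.symm hne]
    · simp [hcount0]

lemma pvSpecD_keys (l : List (Int × Int)) :
    (pvSpecD l).keys = PySem.Set.ofList (l.map Prod.snd) := by
  simp only [pvSpecD, PySem.Dict.keys, List.map_map]
  exact List.map_id'' (fun _ => rfl) _

lemma pvLoop_eq (l : List (Int × Int)) :
    l.foldl pvStepA (PySem.Dict.empty : PySem.Dict Int (PySem.Dict Int Int)) = pvSpecD l := by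
  induction l using List.reverseRecOn with
  | nil => rfl
  | append_singleton l c ih =>
    obtain ⟨x, y⟩ := c
    rw [List.foldl_append, List.foldl_cons, List.foldl_nil, ih, pvStepA_eq]
    have hnodup : (pvSpecD l).keys.Nodup := by
      rw [pvSpecD_keys]; exact PySem.Set.nodup_ofList _
    by_cases hy : y ∈ l.map Prod.snd
    · have hy' : y ∈ PySem.Set.ofList (l.map Prod.snd) := (PySem.Set.mem_ofList _ _).mpr hy
      have hc : (pvSpecD l).contains y = true := by
        rw [PySem.Dict.contains_eq_decide_mem_keys, pvSpecD_keys]; simpa using hy'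
      have hmem : (y, PySem.Dict.mk (pvInner l y)) ∈ (pvSpecD l).items :=
        List.mem_map_of_mem hy'
      have hgetD : (pvSpecD l).getD y PySem.Dict.empty = PySem.Dict.mk (pvInner l y) :=
        PySem.Dict.getD_of_mem_items _ hmem hnodup _
      rw [hgetD, pvInner_step]
      apply PySem.Dict.ext
      rw [PySem.Dict.items_insert_of_contains (h := hc)]
      show _ = (pvSpecD (l ++ [(x, y)])).items
      have hys' : PySem.Set.ofList ((l ++ [(x, y)]).map Prod.snd)
          = PySem.Set.ofList (l.map Prod.snd) := by
        rw [List.map_append, List.map_singleton, PySem.Set.ofList_append_singleton,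
          PySem.Set.add_of_mem hy']
      simp only [pvSpecD, hys', List.map_map]
      apply List.map_congr_left
      intro y0 hy0
      by_cases hyy : y0 = y
      · subst hyy; simp
      · simp only [Function.comp_apply]
        rw [if_neg (by simpa using hyy), pvInner_ne _ _ _ _ hyy]
    · have hy' : y ∉ PySem.Set.ofList (l.map Prod.snd) := fun h => hy ((PySem.Set.mem_ofList _ _).mp h)
      have hc : (pvSpecD l).contains y = false := by
        rw [PySem.Dict.contains_eq_decide_mem_keys, pvSpecD_keys]; simpa using hy'
      have hgetD : (pvSpecD l).getD y PySem.Dict.empty = PySem.Dict.empty :=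
        PySem.Dict.getD_of_not_contains _ _ hc
      rw [hgetD, PySem.Dict.getD_empty]
      apply PySem.Dict.ext
      rw [PySem.Dict.items_insert_of_not_contains (h := hc)]
      show _ = (pvSpecD (l ++ [(x, y)])).items
      have hfilter : l.filter (fun p => p.2 == y) = [] := by
        rw [List.filter_eq_nil_iff]
        intro p hp
        simp only [beq_iff_eq]
        exact fun h => hy (h ▸ List.mem_map_of_mem hp)
      have hcount0 : l.count (x, y) = 0 := by
        rw [List.count_eq_zero]
        exact fun h => hy (List.mem_map_of_mem h)
      have hinner : pvInner (l ++ [(x, y)]) y = [(x, 1)] := by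
        have hone : PySem.Set.ofList [x] = [x] := rfl
        simp [pvInner, List.filter_append, hfilter, List.count_append, hcount0, hone]
      simp only [pvSpecD, List.map_append, List.map_singleton,
        PySem.Set.ofList_append_singleton, PySem.Set.add_of_not_mem hy']
      congr 1
      · apply List.map_congr_left
        intro y0 hy0
        have hne : y0 ≠ y := fun h => hy' (h ▸ hy0)
        rw [pvInner_ne _ _ _ _ hne]
      · rw [hinner]
        have h1 : (PySem.Dict.empty : PySem.Dict Int Int).insert x (0 + 1)
            = PySem.Dict.mk [(x, 1)] := by
          apply PySem.Dict.ext
          rw [PySem.Dict.items_insert_of_not_contains (h := PySem.Dict.contains_empty _)]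
          simp [PySem.Dict.empty]
        rw [h1]

-- ===== VERDICT (by name: the statement is the Claim_ definition above) =====
theorem build_diagram_py_spec : Claim_equal_build_diagram_py := by
  intro l _
  unfold Spec_build_diagram_py build_diagram_py build_diagram_py_alt
  simp only []
  rw [show (fun (diagram : PySem.Dict Int (PySem.Dict Int Int)) (c : Int × Int) =>
      let x := c.1
      let y := c.2
      if diagram.contains y then
        let counts := diagram.getD y PySem.Dict.empty
        if counts.contains x then
          diagram.insert y (counts.insert x (counts.getD x 0 + 1))
        else
          diagram.insert y (counts.insert x 1)
      else
        diagram.insert y ((PySem.Dict.empty : PySem.Dict Int Int).insert x 1)) = pvStepA from rfl]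
  rw [pvLoop_eq]
  have hpairs : l.map (fun c : Int × Int => (c.1, c.2)) = l := by simp
  rw [hpairs]
  simp only [pvSpecD, PySem.List.dedup_eq_ofList, List.map_map, pvInner, PySem.List.count_eq]
  rfl
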